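-- pv_equiv track=rewrite | github.com/Justinzhao666/PythonCode | BasisKnowledge/HigherorderFunction.py | returnlist
-- ===== SOURCE A (Python) =====
-- def returnlist(L):
-- 	newL = []
-- 	newL1 = []
-- 	for var in L:
-- 		if(var == '.'):
-- 			newL.append(newL1)
-- 			newL1 = []
-- 			continue
-- 		else:
-- 			newL1.append(var)
--
-- 	newL.append(newL1[::-1])		#数组倒置，只能说我对切片掌握还不够
-- 	return newL
-- ===== SOURCE B (Python) =====
-- def returnlist(L):
--     res = []
--     start = 0
--     for i, v in enumerate(L):
--         if v == '.':
--             res.append(L[start:i])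
--             start = i + 1
--     res.append(L[start:][::-1])
--     return res
-- ===== Notes on version B (the rewrite author's own statement) =====
-- stated objective: alternative
-- what changed: B replaces A's element-by-element running buffer with an integer cursor: it scans enumerate(L) recording only slice boundaries, emits L[start:i] at each '.', and appends the reversed tail slice L[start:][::-1] at the end.
import Mathlib
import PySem

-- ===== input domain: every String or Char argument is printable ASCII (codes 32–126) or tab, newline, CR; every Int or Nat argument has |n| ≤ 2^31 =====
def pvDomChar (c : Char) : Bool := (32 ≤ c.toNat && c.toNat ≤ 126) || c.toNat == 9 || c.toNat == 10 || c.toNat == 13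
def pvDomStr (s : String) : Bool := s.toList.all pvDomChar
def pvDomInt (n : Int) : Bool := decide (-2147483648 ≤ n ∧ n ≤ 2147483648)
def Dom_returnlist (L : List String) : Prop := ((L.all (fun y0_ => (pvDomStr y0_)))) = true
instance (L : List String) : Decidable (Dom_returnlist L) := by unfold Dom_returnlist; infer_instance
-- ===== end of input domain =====

-- B replaces A's running element buffer with an integer cursor and slices; same O(n) cost (objective: alternative).

-- ===== PORT A =====
-- loop body of A: append to result on '.', else grow the running buffer
def stepA (st : List (List String) × List String) (var : String) : List (List String) × List String :=
  if var = "." then (st.1 ++ [st.2], []) else (st.1, st.2 ++ [var])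

def returnlist (L : List String) : List (List String) :=
  let s := L.foldl stepA ([], [])
  s.1 ++ [s.2.reverse]          -- newL.append(newL1[::-1]); [::-1] is reverse (PySem.List.slice?_none_none_neg_one)

-- ===== PORT B =====
-- loop body of B: on '.', append the slice L[start:i] and move the cursor to i+1
def stepB (L : List String) (st : List (List String) × Int) (iv : Int × String) : List (List String) × Int :=
  if iv.2 = "." then (st.1 ++ [PySem.List.slice L (some st.2) (some iv.1)], iv.1 + 1) else st

def returnlist_alt (L : List String) : List (List String) :=
  let s := (PySem.List.enumerate L 0).foldl (stepB L) ([], 0)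
  s.1 ++ [(PySem.List.slice L (some s.2) none).reverse]   -- res.append(L[start:][::-1])

-- ===== PRECONDITION & SPEC =====
def Spec_returnlist (L : List String) (out : List (List String)) : Prop := out = returnlist_alt L
instance (L : List String) (out : List (List String)) : Decidable (Spec_returnlist L out) := by unfold Spec_returnlist; infer_instance

-- ===== CLAIM (what is proved, stated in full; the proofs are below) =====
def Claim_equal_returnlist : Prop := ∀ (L : List String), Dom_returnlist L → Spec_returnlist L (returnlist L)

-- ===== LEMMAS AND PROOFS =====

-- slicing L = P ++ T from s to P.length (s ≤ |P|) is P.drop s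
lemma slice_prefix (P T : List String) (s : Nat) (hs : s ≤ P.length) :
    PySem.List.slice (P ++ T) (some (s : Int)) (some (P.length : Int)) = P.drop s := by
  rw [PySem.List.slice_natCast, List.drop_append_of_le_length hs]
  have hlen : (P.drop s).length = P.length - s := by simp
  rw [List.take_append_of_le_length (by omega), List.take_of_length_le (by omega)]

-- joint loop invariant: A's fold over the suffix T with buffer P.drop s matches
-- B's fold over enumerate T |P| with cursor s
lemma fold_inv (T P : List String) (res : List (List String)) (s : Nat) (hs : s ≤ P.length) :
    ((PySem.List.enumerate T (P.length : Int)).foldl (stepB (P ++ T)) (res, (s : Int))).1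
      = (T.foldl stepA (res, P.drop s)).1 ∧
    ∃ s' : Nat, s' ≤ (P ++ T).length ∧
      ((PySem.List.enumerate T (P.length : Int)).foldl (stepB (P ++ T)) (res, (s : Int))).2 = (s' : Int) ∧
      (P ++ T).drop s' = (T.foldl stepA (res, P.drop s)).2 := by
  induction T generalizing P res s with
  | nil =>
      refine ⟨rfl, s, by simpa using hs, rfl, ?_⟩
      simp
  | cons v T ih =>
      rw [PySem.List.enumerate_cons]
      by_cases hv : v = "."
      · subst hv
        have h1 : stepB (P ++ "." :: T) (res, (s : Int)) ((P.length : Int), ".")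
            = (res ++ [P.drop s], (P.length : Int) + 1) := by
          simp [stepB, slice_prefix P ("." :: T) s hs]
        have h2 : List.foldl stepA (res, P.drop s) ("." :: T)
            = List.foldl stepA (res ++ [P.drop s], []) T := by
          simp [stepA]
        have hP' : P ++ "." :: T = (P ++ ["."]) ++ T := by simp
        have hlen : ((P.length : Int) + 1) = (((P ++ ["."]).length : Nat) : Int) := by simp
        rw [List.foldl_cons, h1, h2, hP', hlen]
        have h := ih (P ++ ["."]) (res ++ [P.drop s]) (P ++ ["."]).length le_rfl
        simpa using h
      · have h1 : stepB (P ++ v :: T) (res, (s : Int)) ((P.length : Int), v) = (res, (s : Int)) := by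
          simp [stepB, hv]
        have h2 : List.foldl stepA (res, P.drop s) (v :: T)
            = List.foldl stepA (res, P.drop s ++ [v]) T := by
          simp [stepA, hv]
        have hP' : P ++ v :: T = (P ++ [v]) ++ T := by simp
        have hlen : ((P.length : Int) + 1) = (((P ++ [v]).length : Nat) : Int) := by simp
        rw [List.foldl_cons, h1, h2, hP', hlen]
        have hdrop : P.drop s ++ [v] = (P ++ [v]).drop s := by
          rw [List.drop_append_of_le_length (by omega)]
        rw [hdrop]
        exact ih (P ++ [v]) res s (le_trans hs (by simp))
-- ===== VERDICT (by name: the statement is the Claim_ definition above) =====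
theorem returnlist_spec : Claim_equal_returnlist := by
  intro L _
  unfold Spec_returnlist returnlist returnlist_alt
  have h := fold_inv L [] [] 0 (by simp)
  simp only [List.nil_append, List.length_nil, Nat.cast_zero, List.drop_zero] at h
  obtain ⟨h1, s', hs', h2, h3⟩ := h
  simp only []
  rw [h1, h2, PySem.List.slice_from_natCast, h3]
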